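-- pv_equiv track=rewrite | github.com/George-Smirnoff/Bootcamp-100 | Day_3/true_love.py | loveCalc
-- ===== SOURCE A (Python) =====
-- def calcSymbols(symbol, word):
--     return word.lower().count(symbol)
--
-- def loveCalc(name1, name2):
--     first_match = "true"
--     second_match = "love"
--     first_sum = 0
--     second_sum = 0
--
--     for i in first_match:
--         first_sum += calcSymbols(i, name1)
--         first_sum += calcSymbols(i, name2)
--     for i in second_match:
--         second_sum += calcSymbols(i, name1)
--         second_sum += calcSymbols(i, name2)
--     return str(first_sum) + str(second_sum)
-- ===== SOURCE B (Python) =====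
-- def loveCalc(name1, name2):
--     # Single pass over both lowered names instead of eight repeated .count scans (alternative structure).
--     true_sum = 0
--     love_sum = 0
--     for c in name1.lower() + name2.lower():
--         if c in "true":
--             true_sum += 1
--         if c in "love":
--             love_sum += 1
--     return str(true_sum) + str(love_sum)
-- ===== Notes on version B (the rewrite author's own statement) =====
-- stated objective: alternative
-- what changed: Replaces the eight repeated word.lower().count(symbol) scans (each lowering and scanning a whole name) with a single pass over the two lowered names tallying membership in 'true' and 'love' in one accumulator pair.
import Mathlib
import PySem

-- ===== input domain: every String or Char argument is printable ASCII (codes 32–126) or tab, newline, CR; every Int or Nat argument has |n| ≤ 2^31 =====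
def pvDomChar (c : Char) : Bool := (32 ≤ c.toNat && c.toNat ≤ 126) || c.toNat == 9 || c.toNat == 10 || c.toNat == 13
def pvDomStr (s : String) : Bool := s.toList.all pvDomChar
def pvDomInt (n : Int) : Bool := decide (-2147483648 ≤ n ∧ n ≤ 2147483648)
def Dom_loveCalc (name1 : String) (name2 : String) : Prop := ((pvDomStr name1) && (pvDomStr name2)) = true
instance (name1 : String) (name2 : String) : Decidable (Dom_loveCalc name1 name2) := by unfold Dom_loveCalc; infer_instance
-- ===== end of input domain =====

-- B replaces A's eight repeated lower+count scans by one pass over the two lowered names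
-- tallying membership in "true" and "love" (objective: alternative single-pass algorithm).


-- ===== PORT A =====
def calcSymbols (symbol : String) (word : String) : Int :=
  (PySem.Str.count (PySem.Str.lower word) symbol : Int)

def loveCalc (name1 : String) (name2 : String) : String :=
  let first_match := "true"
  let second_match := "love"
  let first_sum : Int := first_match.toList.foldl
    (fun acc i => acc + calcSymbols (String.ofList [i]) name1 + calcSymbols (String.ofList [i]) name2) 0
  let second_sum : Int := second_match.toList.foldl
    (fun acc i => acc + calcSymbols (String.ofList [i]) name1 + calcSymbols (String.ofList [i]) name2) 0
  PySem.Int.toStr first_sum ++ PySem.Int.toStr second_sum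

-- ===== PORT B =====
def loveCalc_alt (name1 : String) (name2 : String) : String :=
  let cs := (PySem.Str.lower name1).toList ++ (PySem.Str.lower name2).toList
  -- 'c in "true"' on a 1-char c is PySem.Chars.isIn [c] "true".toList (exact)
  let sums := cs.foldl (fun (acc : Int × Int) c =>
      ((if PySem.Chars.isIn [c] "true".toList then acc.1 + 1 else acc.1),
       (if PySem.Chars.isIn [c] "love".toList then acc.2 + 1 else acc.2))) (0, 0)
  PySem.Int.toStr sums.1 ++ PySem.Int.toStr sums.2

-- ===== PRECONDITION & SPEC =====
def Spec_loveCalc (name1 : String) (name2 : String) (out : String) : Prop := out = loveCalc_alt name1 name2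
instance (name1 : String) (name2 : String) (out : String) : Decidable (Spec_loveCalc name1 name2 out) := by unfold Spec_loveCalc; infer_instance

-- ===== CLAIM (what is proved, stated in full; the proofs are below) =====
def Claim_equal_loveCalc : Prop := ∀ (name1 : String) (name2 : String), Dom_loveCalc name1 name2 → Spec_loveCalc name1 name2 (loveCalc name1 name2)

-- ===== LEMMAS AND PROOFS =====

-- Python str.count with a single-character needle is the character count.
theorem count_go_singleton (c : Char) : ∀ (fuel : Nat) (l : List Char) (acc : Nat), l.length ≤ fuel →
    PySem.Chars.count.go [c] fuel l acc = acc + l.count c := by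
  intro fuel
  induction fuel with
  | zero => intro l acc h; cases l with
    | nil => simp [PySem.Chars.count.go]
    | cons a t => simp at h
  | succ n ih => intro l acc h; cases l with
    | nil => simp [PySem.Chars.count.go]
    | cons a t =>
      simp only [PySem.Chars.count.go, List.count_cons]
      by_cases hc : c = a
      · subst hc
        simp [List.isPrefixOf, ih t (acc + 1) (by simpa using h)]
        omega
      · simp [List.isPrefixOf, Ne.symm hc, hc, ih t acc (by simpa using h)]

theorem count_singleton (l : List Char) (c : Char) : PySem.Chars.count l [c] = l.count c := by
  simp [PySem.Chars.count, count_go_singleton c l.length l 0 le_rfl]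

-- Python 'c in s' with a single-character c is character membership.
theorem isIn_singleton (l : List Char) (c : Char) : PySem.Chars.isIn [c] l = l.contains c := by
  by_cases h : c ∈ l
  · simp [h, (PySem.Chars.isIn_iff_infix [c] l).2 ((List.singleton_infix_iff c l).2 h)]
  · have : ¬ PySem.Chars.isIn [c] l = true := fun hh =>
      h ((List.singleton_infix_iff c l).1 ((PySem.Chars.isIn_iff_infix [c] l).1 hh))
    simp [Bool.eq_false_iff.2 this, h]

-- Counting membership in a 4-letter alphabet of distinct letters = sum of four char counts.
theorem four_count (l : List Char) (a b c d : Char) (hab : a ≠ b) (hac : a ≠ c) (had : a ≠ d)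
    (hbc : b ≠ c) (hbd : b ≠ d) (hcd : c ≠ d) :
    l.countP (fun x => x ∈ ([a, b, c, d] : List Char)) =
      l.count a + l.count b + l.count c + l.count d := by
  induction l with
  | nil => simp
  | cons x t ih =>
    simp only [List.countP_cons, List.count_cons, ih]
    by_cases h1 : x = a <;> by_cases h2 : x = b <;> by_cases h3 : x = c <;> by_cases h4 : x = d <;>
      simp_all <;> omega

-- ===== VERDICT (by name: the statement is the Claim_ definition above) =====
theorem loveCalc_spec : Claim_equal_loveCalc := by
  intro name1 name2 _
  unfold Spec_loveCalc loveCalc loveCalc_alt calcSymbols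
  dsimp only
  set l1 := (PySem.Str.lower name1).toList with hl1
  set l2 := (PySem.Str.lower name2).toList with hl2
  have htrue : ("true".toList : List Char) = ['t', 'r', 'u', 'e'] := rfl
  have hlove : ("love".toList : List Char) = ['l', 'o', 'v', 'e'] := rfl
  have hcongr : ∀ (target : List Char),
      (l1 ++ l2).countP (fun c => PySem.Chars.isIn [c] target) =
      (l1 ++ l2).countP (fun c => c ∈ target) :=
    fun target => List.countP_congr (fun x _ => by simp [isIn_singleton])
  -- split B's paired fold and turn each component into a countP, then into four char counts
  rw [PySem.List.foldl_prod_mk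
    (fun a c => if PySem.Chars.isIn [c] "true".toList then a + 1 else a)
    (fun a c => if PySem.Chars.isIn [c] "love".toList then a + 1 else a) (l1 ++ l2) 0 0,
    PySem.List.foldl_if_add_one, PySem.List.foldl_if_add_one, hcongr, hcongr, htrue, hlove,
    four_count _ 't' 'r' 'u' 'e' (by decide) (by decide) (by decide) (by decide) (by decide) (by decide),
    four_count _ 'l' 'o' 'v' 'e' (by decide) (by decide) (by decide) (by decide) (by decide) (by decide)]
  -- A's sums: unfold the two 4-step folds into explicit single-char counts
  simp only [List.foldl_cons, List.foldl_nil, PySem.Str.count_eq, String.toList_ofList,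
    count_singleton, ← hl1, ← hl2, List.count_append]
  congr 2 <;> push_cast <;> ring
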